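-- pv_equiv track=rewrite | github.com/craigontour/AdventOfCode | 2019/day4.py | check_facts1
-- ===== SOURCE A (Python) =====
-- def check_facts1(n):
--   s = str(n)
--
--   asc = True
--   neigh = False
--
--   for i in range(len(s)-1):
--     if s[i] > s[i+1]:
--       asc = False
--       break
--     if s[i] == s[i+1]:
--       neigh = True
--
--   return asc and neigh
-- ===== SOURCE B (Python) =====
-- def check_facts1(n):
--   s = str(n)
--   return s == ''.join(sorted(s)) and len(set(s)) < len(s)
-- ===== Notes on version B (the rewrite author's own statement) =====
-- stated objective: simpler
-- what changed: Replaced the manual index loop with two whole-string tests: s equals its sorted form (non-decreasing) and len(set(s)) < len(s) (some repeated digit, which in a sorted string is necessarily adjacent).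
import Mathlib
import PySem

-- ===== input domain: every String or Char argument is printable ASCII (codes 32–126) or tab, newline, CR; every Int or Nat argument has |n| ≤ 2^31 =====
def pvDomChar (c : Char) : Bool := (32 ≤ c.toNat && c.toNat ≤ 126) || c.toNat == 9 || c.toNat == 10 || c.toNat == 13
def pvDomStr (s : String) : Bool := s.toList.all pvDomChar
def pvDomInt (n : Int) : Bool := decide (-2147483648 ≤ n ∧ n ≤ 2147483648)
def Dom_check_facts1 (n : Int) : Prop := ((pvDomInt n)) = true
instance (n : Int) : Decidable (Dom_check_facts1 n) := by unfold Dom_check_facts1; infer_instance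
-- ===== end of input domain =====

-- B replaces A's manual index loop by two whole-string tests (s == sorted(s), and a repeated
-- character via set size); objective: simpler.

-- ===== PORT A =====
-- A's for-loop over i in range(len(s)-1) with state (asc, neigh) and an early break when
-- s[i] > s[i+1]; the obvious structural recursion over the same adjacent pairs and the same
-- state (the break returns `asc and neigh` = false immediately; falling off the loop with
-- asc = True returns neigh).
def check_facts1_loop : List Char → Bool → Bool
  | a :: b :: rest, neigh =>
      if a > b then false
      else check_facts1_loop (b :: rest) (neigh || a == b)
  | _, neigh => neigh

def check_facts1 (n : Int) : Bool :=
  check_facts1_loop (PySem.Int.toStr n).toList false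

-- ===== PORT B =====
def check_facts1_alt (n : Int) : Bool :=
  let s := PySem.Int.toStr n
  (s.toList == PySem.List.sorted s.toList (fun c => c) false)
    && decide ((PySem.Set.ofList s.toList).length < s.toList.length)

-- ===== PRECONDITION & SPEC =====
def Spec_check_facts1 (n : Int) (out : Bool) : Prop := out = check_facts1_alt n
instance (n : Int) (out : Bool) : Decidable (Spec_check_facts1 n out) := by unfold Spec_check_facts1; infer_instance

-- ===== CLAIM (what is proved, stated in full; the proofs are below) =====
def Claim_equal_check_facts1 : Prop := ∀ (n : Int), Dom_check_facts1 n → Spec_check_facts1 n (check_facts1 n)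

-- ===== LEMMAS AND PROOFS =====

-- adjacent non-decreasing, and adjacent duplicate, as plain predicates
def pvChainLe : List Char → Bool
  | a :: b :: r => (decide (a ≤ b)) && pvChainLe (b :: r)
  | _ => true

def pvAdjEq : List Char → Bool
  | a :: b :: r => (a == b) || pvAdjEq (b :: r)
  | _ => false

theorem loop_eq (l : List Char) (neigh : Bool) :
    check_facts1_loop l neigh = (pvChainLe l && (neigh || pvAdjEq l)) := by
  induction l generalizing neigh with
  | nil => simp [check_facts1_loop, pvChainLe, pvAdjEq]
  | cons a t ih =>
    cases t with
    | nil => simp [check_facts1_loop, pvChainLe, pvAdjEq]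
    | cons b r =>
      simp only [check_facts1_loop, pvChainLe, pvAdjEq]
      by_cases h : a > b
      · simp [h, not_le.mpr h]
      · have hle : a ≤ b := not_lt.mp h
        rw [if_neg h, ih]
        simp [hle]
        cases neigh <;> cases (a == b) <;> simp

theorem chainLe_iff_chain (l : List Char) :
    pvChainLe l = true ↔ List.IsChain (· ≤ ·) l := by
  induction l with
  | nil => simp [pvChainLe]
  | cons a t ih =>
    cases t with
    | nil => simp [pvChainLe]
    | cons b r =>
      simp only [pvChainLe, Bool.and_eq_true, decide_eq_true_eq, List.isChain_cons_cons]
      exact and_congr Iff.rfl ih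

theorem chainLe_iff_pairwise (l : List Char) :
    pvChainLe l = true ↔ l.Pairwise (· ≤ ·) := by
  rw [chainLe_iff_chain, List.isChain_iff_pairwise]

theorem chainLe_iff_sorted (l : List Char) :
    pvChainLe l = true ↔ l = PySem.List.sorted l (fun c => c) false := by
  constructor
  · intro h
    exact (PySem.List.sorted_eq_self_of_pairwise l (fun c => c)
      ((chainLe_iff_pairwise l).mp h)).symm
  · intro h
    rw [chainLe_iff_pairwise, h]
    exact PySem.List.sorted_pairwise l (fun c => c)

theorem adjEq_iff_not_nodup (l : List Char) (hp : l.Pairwise (· ≤ ·)) :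
    pvAdjEq l = true ↔ ¬ l.Nodup := by
  induction l with
  | nil => simp [pvAdjEq]
  | cons a t ih =>
    cases t with
    | nil => simp [pvAdjEq]
    | cons b r =>
      obtain ⟨hhead, hp'⟩ := List.pairwise_cons.mp hp
      have hab : a ≤ b := hhead b List.mem_cons_self
      simp only [pvAdjEq, Bool.or_eq_true, beq_iff_eq]
      by_cases hE : a = b
      · constructor
        · intro _ hnd
          exact (List.nodup_cons.mp hnd).1 (hE ▸ List.mem_cons_self)
        · intro _; exact Or.inl hE
      · have hnotmem : a ∉ b :: r := by
          intro hmem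
          have hba : b ≤ a := by
            rcases List.mem_cons.mp hmem with h | h
            · exact le_of_eq h.symm
            · exact (List.pairwise_cons.mp hp').1 a h
          exact hE (le_antisymm hab hba)
        rw [List.nodup_cons]
        constructor
        · intro h
          rcases h with h | h
          · exact absurd h hE
          · intro hc; exact (ih hp').mp h hc.2
        · intro h
          have : ¬ (b :: r).Nodup := by
            by_contra hc
            exact h ⟨hnotmem, hc⟩
          exact Or.inr ((ih hp').mpr this)

theorem setlen_iff_not_nodup (l : List Char) :
    (PySem.Set.ofList l).length < l.length ↔ ¬ l.Nodup := by
  have hperm : (PySem.Set.ofList l).Perm l.dedup := by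
    rw [List.perm_ext_iff_of_nodup (PySem.Set.nodup_ofList l) l.nodup_dedup]
    intro x
    simp [PySem.Set.mem_ofList, List.mem_dedup]
  rw [hperm.length_eq]
  constructor
  · intro h hnd
    rw [List.Nodup.dedup hnd] at h
    exact lt_irrefl _ h
  · intro hnd
    have hle : l.dedup.length ≤ l.length := l.dedup_sublist.length_le
    rcases lt_or_eq_of_le hle with h | h
    · exact h
    · exfalso
      have := l.dedup_sublist.eq_of_length h
      exact hnd (this ▸ l.nodup_dedup)

theorem main_eq (l : List Char) :
    check_facts1_loop l false =
      ((l == PySem.List.sorted l (fun c => c) false)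
        && decide ((PySem.Set.ofList l).length < l.length)) := by
  rw [loop_eq]
  by_cases hc : pvChainLe l = true
  · have hs : l = PySem.List.sorted l (fun c => c) false := (chainLe_iff_sorted l).mp hc
    have hb : (l == PySem.List.sorted l (fun c => c) false) = true := by
      simpa using hs
    rw [hc, hb]
    simp only [Bool.true_and, Bool.false_or]
    have hp := (chainLe_iff_pairwise l).mp hc
    by_cases hn : l.Nodup
    · have h1 : pvAdjEq l = false := by
        cases h : pvAdjEq l
        · rfl
        · exact absurd hn ((adjEq_iff_not_nodup l hp).mp h)
      have h2 : ¬ (PySem.Set.ofList l).length < l.length := by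
        rw [setlen_iff_not_nodup]; simpa using hn
      simp [h1, h2]
    · have h1 : pvAdjEq l = true := (adjEq_iff_not_nodup l hp).mpr hn
      have h2 : (PySem.Set.ofList l).length < l.length := (setlen_iff_not_nodup l).mpr hn
      simp [h1, h2]
  · have hcf : pvChainLe l = false := by
      cases h : pvChainLe l
      · rfl
      · exact absurd h hc
    have hs : l ≠ PySem.List.sorted l (fun c => c) false := by
      intro h
      exact hc ((chainLe_iff_sorted l).mpr h)
    have hb : (l == PySem.List.sorted l (fun c => c) false) = false := by
      simpa using hs
    simp [hcf, hb]

-- ===== VERDICT (by name: the statement is the Claim_ definition above) =====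
theorem check_facts1_spec : Claim_equal_check_facts1 := by
  intro n _
  unfold Spec_check_facts1 check_facts1 check_facts1_alt
  exact main_eq _
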